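-- pv_equiv track=rewrite | github.com/bepoetree/MTTOD | reader.py | bucket_by_turn
-- ===== SOURCE A (Python) =====
-- from collections import OrderedDict, defaultdict
--
-- def bucket_by_turn(encoded_data):
--     turn_bucket = {}
--     for dial in encoded_data:
--         turn_len = len(dial)
--         if turn_len not in turn_bucket:
--             turn_bucket[turn_len] = []
--
--         turn_bucket[turn_len].append(dial)
--
--     return OrderedDict(sorted(turn_bucket.items(), key=lambda i: i[0]))
-- ===== SOURCE B (Python) =====
-- from collections import OrderedDict
--
-- def bucket_by_turn(encoded_data):
--     lengths = sorted(set(len(dial) for dial in encoded_data))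
--     return OrderedDict(
--         (k, [dial for dial in encoded_data if len(dial) == k]) for k in lengths
--     )
-- ===== Notes on version B (the rewrite author's own statement) =====
-- stated objective: simpler
-- what changed: Replaces the mutable hash-bucket loop plus key-sort with a direct comprehension: sort the distinct dialogue lengths, then build each group with one filter pass per length.
import Mathlib
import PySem

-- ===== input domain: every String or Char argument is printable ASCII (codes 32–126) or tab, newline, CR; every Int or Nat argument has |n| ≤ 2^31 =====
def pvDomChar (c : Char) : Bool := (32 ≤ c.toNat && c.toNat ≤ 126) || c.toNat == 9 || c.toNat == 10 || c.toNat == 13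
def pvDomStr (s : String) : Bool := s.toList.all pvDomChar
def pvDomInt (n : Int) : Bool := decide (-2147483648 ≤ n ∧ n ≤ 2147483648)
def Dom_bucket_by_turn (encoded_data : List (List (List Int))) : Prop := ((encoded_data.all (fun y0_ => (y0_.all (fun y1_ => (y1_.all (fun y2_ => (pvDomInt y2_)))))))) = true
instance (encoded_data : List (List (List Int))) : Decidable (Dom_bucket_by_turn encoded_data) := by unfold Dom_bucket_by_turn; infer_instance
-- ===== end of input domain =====

-- B replaces the hash-bucket-then-sort-keys loop by "sorted distinct lengths, then one filter per length" (simpler, no dict).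
-- ===== PORT A =====
-- the loop body: 'if turn_len not in turn_bucket: turn_bucket[turn_len] = []' then 'turn_bucket[turn_len].append(dial)'
def bucketStep (d : PySem.Dict Int (List (List (List Int)))) (dial : List (List Int)) :
    PySem.Dict Int (List (List (List Int))) :=
  let turn_len : Int := dial.length
  let d := if d.contains turn_len then d else d.insert turn_len []
  d.insert turn_len (d.getD turn_len [] ++ [dial])

def bucket_by_turn (encoded_data : List (List (List Int))) : List (Int × List (List (List Int))) :=
  let turn_bucket := encoded_data.foldl bucketStep PySem.Dict.empty
  -- OrderedDict(sorted(turn_bucket.items(), key=lambda i: i[0])): an OrderedDict as an assoc list in insertion order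
  PySem.List.sorted turn_bucket.items (fun i => i.1) false

-- ===== PORT B =====
def bucket_by_turn_alt (encoded_data : List (List (List Int))) : List (Int × List (List (List Int))) :=
  let lengths := PySem.List.sorted (PySem.Set.ofList (encoded_data.map (fun dial => (dial.length : Int)))) (fun x => x) false
  -- OrderedDict over distinct keys, as an assoc list in insertion order
  lengths.map (fun k => (k, encoded_data.filter (fun dial => (dial.length : Int) == k)))

-- ===== PRECONDITION & SPEC =====
def Spec_bucket_by_turn (encoded_data : List (List (List Int))) (out : List (Int × List (List (List Int)))) : Prop := out = bucket_by_turn_alt encoded_data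
instance (encoded_data : List (List (List Int))) (out : List (Int × List (List (List Int)))) : Decidable (Spec_bucket_by_turn encoded_data out) := by unfold Spec_bucket_by_turn; infer_instance

-- ===== CLAIM (what is proved, stated in full; the proofs are below) =====
def Claim_equal_bucket_by_turn : Prop := ∀ (encoded_data : List (List (List Int))), Dom_bucket_by_turn encoded_data → Spec_bucket_by_turn encoded_data (bucket_by_turn encoded_data)

-- ===== LEMMAS AND PROOFS =====

theorem bucketStep_of_contains (d : PySem.Dict Int (List (List (List Int)))) (dial : List (List Int))
    (hc : d.contains (dial.length : Int) = true) :
    bucketStep d dial = d.insert (dial.length : Int) (d.getD (dial.length : Int) [] ++ [dial]) := by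
  simp [bucketStep, hc]

theorem bucketStep_of_not_contains (d : PySem.Dict Int (List (List (List Int)))) (dial : List (List Int))
    (hc : d.contains (dial.length : Int) = false) :
    bucketStep d dial
      = (d.insert (dial.length : Int) []).insert (dial.length : Int)
          ((d.insert (dial.length : Int) []).getD (dial.length : Int) [] ++ [dial]) := by
  simp [bucketStep, hc]

-- characterization of A's dict: items = first-occurrence distinct lengths, each paired with the filter of the processed prefix
theorem items_foldl_bucketStep (xs : List (List (List Int))) :
    (xs.foldl bucketStep PySem.Dict.empty).items
      = (PySem.Set.ofList (xs.map (fun dial => (dial.length : Int)))).map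
          (fun k => (k, xs.filter (fun dial => (dial.length : Int) == k))) := by
  induction xs using List.reverseRecOn with
  | nil => rfl
  | append_singleton xs x ih =>
    have hkeys : (xs.foldl bucketStep PySem.Dict.empty).keys
        = PySem.Set.ofList (xs.map (fun dial => (dial.length : Int))) := by
      simp only [PySem.Dict.keys, ih, List.map_map]
      exact List.map_id' _
    have hnodup : (xs.foldl bucketStep PySem.Dict.empty).keys.Nodup := by
      rw [hkeys]; exact PySem.Set.nodup_ofList _
    rw [List.foldl_append, List.foldl_cons, List.foldl_nil]
    rw [List.map_append, List.map_singleton, PySem.Set.ofList_append_singleton]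
    set d := xs.foldl bucketStep PySem.Dict.empty with hd
    set K := PySem.Set.ofList (xs.map (fun dial => (dial.length : Int))) with hK
    by_cases hmem : (x.length : Int) ∈ K
    · have hc : d.contains (x.length : Int) = true := by
        rw [PySem.Dict.contains_eq_decide_mem_keys, hkeys]; simpa using hmem
      have hitem : ((x.length : Int), xs.filter (fun dial => (dial.length : Int) == (x.length : Int))) ∈ d.items := by
        rw [ih]; exact List.mem_map_of_mem hmem
      have hgetD : d.getD (x.length : Int) [] = xs.filter (fun dial => (dial.length : Int) == (x.length : Int)) :=
        PySem.Dict.getD_of_mem_items d hitem hnodup []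
      rw [bucketStep_of_contains d x hc]
      rw [PySem.Dict.items_insert_of_contains _ _ hc, hgetD,
        PySem.Set.add_of_mem hmem, ih, List.map_map]
      apply List.map_congr_left
      intro k hk
      by_cases hkx : k = (x.length : Int)
      · subst hkx; simp
      · have h2 : ((x.length : Int) == k) = false := by simpa using Ne.symm hkx
        simp [h2, List.filter_append]
        intro h
        exact absurd h hkx
    · have hc : d.contains (x.length : Int) = false := by
        rw [PySem.Dict.contains_eq_decide_mem_keys, hkeys]; simpa using hmem
      rw [bucketStep_of_not_contains d x hc]
      have hc2 : (d.insert (x.length : Int) []).contains (x.length : Int) = true :=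
        PySem.Dict.contains_insert_self _ _ _
      rw [PySem.Dict.getD_insert_self, PySem.Dict.items_insert_of_contains _ _ hc2,
        PySem.Dict.items_insert_of_not_contains _ _ hc,
        PySem.Set.add_of_not_mem hmem, ih]
      rw [List.map_append, List.map_append, List.map_map]
      congr 1
      · apply List.map_congr_left
        intro k hk
        have hkx : k ≠ (x.length : Int) := fun h => hmem (h ▸ hk)
        have h2 : ((x.length : Int) == k) = false := by simpa using Ne.symm hkx
        simp [h2, List.filter_append]
        intro h
        exact absurd h hkx
      · have hfilt : xs.filter (fun dial => (dial.length : Int) == (x.length : Int)) = [] := by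
          rw [List.filter_eq_nil_iff]
          intro a ha h
          apply hmem
          rw [hK, PySem.Set.mem_ofList]
          have hlen : (a.length : Int) = (x.length : Int) := by simpa using h
          exact hlen ▸ List.mem_map_of_mem (f := fun dial => (dial.length : Int)) ha
        simp [List.filter_append, hfilt]

-- ===== VERDICT (by name: the statement is the Claim_ definition above) =====
theorem bucket_by_turn_spec : Claim_equal_bucket_by_turn := by
  intro xs _
  show bucket_by_turn xs = bucket_by_turn_alt xs
  show PySem.List.sorted (xs.foldl bucketStep PySem.Dict.empty).items (fun i => i.1) false
      = (PySem.List.sorted (PySem.Set.ofList (xs.map (fun dial => (dial.length : Int)))) (fun x => x) false).map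
          (fun k => (k, xs.filter (fun dial => (dial.length : Int) == k)))
  rw [items_foldl_bucketStep]
  set K := PySem.Set.ofList (xs.map (fun dial => (dial.length : Int))) with hK
  set f : Int → Int × List (List (List Int)) :=
    fun k => (k, xs.filter (fun dial => (dial.length : Int) == k)) with hf
  apply PySem.List.sorted_eq_of_perm_of_pairwise_lt
  · exact (PySem.List.sorted_perm K (fun x => x) false).map f
  · have hp : (PySem.List.sorted K (fun x => x) false).Pairwise (· < ·) :=
      PySem.List.sorted_ofList_pairwise_lt _
    exact (List.pairwise_map).mpr (by simpa [hf] using hp)
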